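-- pv_equiv track=rewrite | github.com/guyleaf/python | homework/033. 五子棋/test33.py | find_slash_right
-- ===== SOURCE A (Python) =====
-- def find_slash_right(slash_right, i, slash_new): #找出右斜能連成一條線之空格
--     if(slash_right[i].count('1')<4):
--         return slash_new
--     for j in range(len(slash_right[i])-4): #一樣5個為一組 總共len(slash_right[i])-4組 j指初始index
--         if(slash_right[i][j:j+5].count('1')!=4): #先去除不足4個1或超過4個1
--             continue
-- #--------------以下都是組別已有4個1--------------------
--         elif(i>=6):
--             x = slash_right[i][j:j+5].index('0')+j #空格index(5個一組)+j(目前第幾個index)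
--             slash_new.append((x, 9-(x+i%5)))
--         else:
--             x = slash_right[i][j:j+5].index('0')+j
--             slash_new.append((x+i, 9-x))
--     return slash_new
-- ===== SOURCE B (Python) =====
-- def find_slash_right(slash_right, i, slash_new):
--     # prefix tables instead of per-window slicing: pref[k] = #'1' in row[:k],
--     # wsum[k] = sum of positions of non-'1' chars in row[:k]; a 4-one window's
--     # unique non-'1' position is then an O(1) difference.
--     row = slash_right[i]
--     n = len(row)
--     pref = [0]
--     t = 0
--     for c in row:
--         t += 1 if c == '1' else 0
--         pref.append(t)
--     if t < 4:
--         return slash_new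
--     wsum = [0]
--     u = 0
--     for p, c in enumerate(row):
--         u += 0 if c == '1' else p
--         wsum.append(u)
--     for j in range(n - 4):
--         if pref[j + 5] - pref[j] != 4:
--             continue
--         x = wsum[j + 5] - wsum[j]
--         if row[x] != '0':
--             continue
--         if i >= 6:
--             slash_new.append((x, 9 - (x + i % 5)))
--         else:
--             slash_new.append((x + i, 9 - x))
--     return slash_new
-- ===== Notes on version B (the rewrite author's own statement) =====
-- stated objective: alternative
-- what changed: A re-slices each 5-cell window and scans it with count() and index(); B builds two prefix tables in single passes (running one-count and running sum of non-'1' positions) so each window's one-count and its unique empty cell come from O(1) table differences, with an explicit check that the unique non-'1' cell is '0'.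
import Mathlib
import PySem

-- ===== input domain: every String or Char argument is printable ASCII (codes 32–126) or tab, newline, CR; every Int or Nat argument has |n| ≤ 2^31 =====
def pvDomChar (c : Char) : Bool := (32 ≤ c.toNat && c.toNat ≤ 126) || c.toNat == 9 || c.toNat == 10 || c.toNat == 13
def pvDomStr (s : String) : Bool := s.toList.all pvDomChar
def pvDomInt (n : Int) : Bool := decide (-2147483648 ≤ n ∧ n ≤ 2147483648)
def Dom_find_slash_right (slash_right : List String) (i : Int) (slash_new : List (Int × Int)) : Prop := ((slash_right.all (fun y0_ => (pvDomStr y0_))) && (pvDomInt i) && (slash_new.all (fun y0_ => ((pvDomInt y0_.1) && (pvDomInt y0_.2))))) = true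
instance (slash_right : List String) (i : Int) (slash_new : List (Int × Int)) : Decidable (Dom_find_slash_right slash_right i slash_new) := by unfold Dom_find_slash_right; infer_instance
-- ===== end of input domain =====

-- B replaces A's per-window slice/count/index scans by two prefix tables (one-counts and
-- positions of non-'1' chars) built in single passes; equal return values (both mutate
-- slash_new in the same way in Python).

-- ===== PORT A =====
def find_slash_right (slash_right : List String) (i : Int) (slash_new : List (Int × Int)) : List (Int × Int) :=
  let row := ((PySem.List.pyGet? slash_right i).getD "").toList   -- slash_right[i]; IndexError excluded by Pre_
  if ((PySem.Chars.count row ['1'] : Int) < 4) then slash_new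
  else
    (PySem.List.pyRange 0 ((row.length : Int) - 4) 1).foldl (fun acc j =>
      if ((PySem.Chars.count (PySem.List.slice row (some j) (some (j + 5))) ['1'] : Int) ≠ 4) then acc
      else if i ≥ 6 then
        -- .index('0'): ValueError (no '0' in the window) excluded by Pre_
        let x : Int := (((PySem.List.index? (PySem.List.slice row (some j) (some (j + 5))) '0').getD 0 : Nat) : Int) + j
        acc ++ [(x, 9 - (x + PySem.Int.mod i 5))]
      else
        let x : Int := (((PySem.List.index? (PySem.List.slice row (some j) (some (j + 5))) '0').getD 0 : Nat) : Int) + j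
        acc ++ [(x + i, 9 - x)]) slash_new

-- ===== PORT B =====
def find_slash_right_alt (slash_right : List String) (i : Int) (slash_new : List (Int × Int)) : List (Int × Int) :=
  let row := ((PySem.List.pyGet? slash_right i).getD "").toList   -- slash_right[i]; IndexError excluded by Pre_
  let n : Int := (row.length : Int)
  let pt := row.foldl (fun (s : List Int × Int) c =>
      let t := s.2 + (if c = '1' then (1:Int) else 0)
      (s.1 ++ [t], t)) ([0], 0)
  if pt.2 < 4 then slash_new
  else
    let wu := (PySem.List.enumerate row 0).foldl (fun (s : List Int × Int) pc =>
      let u := s.2 + (if pc.2 = '1' then (0:Int) else pc.1)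
      (s.1 ++ [u], u)) ([0], 0)
    (PySem.List.pyRange 0 (n - 4) 1).foldl (fun acc j =>
      if PySem.List.pyGetD pt.1 (j + 5) 0 - PySem.List.pyGetD pt.1 j 0 ≠ 4 then acc
      else
        let x := PySem.List.pyGetD wu.1 (j + 5) 0 - PySem.List.pyGetD wu.1 j 0
        if ((PySem.List.pyGet? row x).getD ' ' ≠ '0') then acc
        else if i ≥ 6 then acc ++ [(x, 9 - (x + PySem.Int.mod i 5))]
        else acc ++ [(x + i, 9 - x)]) slash_new

-- ===== PRECONDITION & SPEC =====
def pvRow (slash_right : List String) (i : Int) : List Char :=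
  ((PySem.List.pyGet? slash_right i).getD "").toList

def pvWindow (cs : List Char) (j : Nat) : List Char := (cs.drop j).take 5

-- Pre_ excludes exactly the inputs where A raises: an out-of-range row index i (IndexError)
-- and rows with a 5-cell window holding four '1's but no '0' (.index('0') ValueError).
def Pre_find_slash_right (slash_right : List String) (i : Int) (slash_new : List (Int × Int)) : Prop :=
  PySem.Raise.InRange slash_right.length i ∧
  ∀ j : Nat, j < (pvRow slash_right i).length - 4 →
    (pvWindow (pvRow slash_right i) j).count '1' = 4 → '0' ∈ pvWindow (pvRow slash_right i) j

instance (slash_right : List String) (i : Int) (slash_new : List (Int × Int)) : Decidable (Pre_find_slash_right slash_right i slash_new) := by unfold Pre_find_slash_right; infer_instance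

def pvWitness_find_slash_right : List String × Int × (List (Int × Int)) := (["0111100000"], 0, [])

def Spec_find_slash_right (slash_right : List String) (i : Int) (slash_new : List (Int × Int)) (out : List (Int × Int)) : Prop := out = find_slash_right_alt slash_right i slash_new
instance (slash_right : List String) (i : Int) (slash_new : List (Int × Int)) (out : List (Int × Int)) : Decidable (Spec_find_slash_right slash_right i slash_new out) := by unfold Spec_find_slash_right; infer_instance

-- ===== CLAIM (what is proved, stated in full; the proofs are below) =====
def Claim_equal_find_slash_right : Prop := ∀ (slash_right : List String) (i : Int) (slash_new : List (Int × Int)), Dom_find_slash_right slash_right i slash_new → Pre_find_slash_right slash_right i slash_new → Spec_find_slash_right slash_right i slash_new (find_slash_right slash_right i slash_new)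

-- ===== LEMMAS AND PROOFS =====

-- Python str.count with a single-character needle is List.count.
theorem pv_count_go_singleton (c : Char) : ∀ (fuel : Nat) (l : List Char) (acc : Nat), l.length ≤ fuel →
    PySem.Chars.count.go [c] fuel l acc = acc + l.count c := by
  intro fuel
  induction fuel with
  | zero =>
    intro l acc h
    cases l with
    | nil => rfl
    | cons a t => simp at h
  | succ n ih =>
    intro l acc h
    cases l with
    | nil => rfl
    | cons a t =>
      rw [PySem.Chars.count.go]
      by_cases hc : a = c
      · subst hc
        simp [List.isPrefixOf, ih t (acc + 1) (by simpa using h)]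
        omega
      · simp [List.isPrefixOf, Ne.symm hc, hc, ih t acc (by simpa using h)]

theorem pv_count_single (c : Char) (cs : List Char) : PySem.Chars.count cs [c] = cs.count c := by
  simp [PySem.Chars.count, pv_count_go_singleton c cs.length cs 0 le_rfl]

theorem pv_scanSum {α : Type} (v : α → Int) :
    ∀ (l : List α) (pr : List Int) (t : Int),
      l.foldl (fun (s : List Int × Int) c => (s.1 ++ [s.2 + v c], s.2 + v c)) (pr, t)
      = (pr ++ (List.range l.length).map (fun k => t + ((l.take (k+1)).map v).sum),
         t + (l.map v).sum) := by
  intro l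
  induction l with
  | nil => intro pr t; simp
  | cons a l ih =>
    intro pr t
    simp only [List.foldl_cons, List.length_cons, ih, List.range_succ_eq_map, List.map_cons,
      List.map_map, List.take_succ_cons, List.sum_cons]
    simp [Function.comp, add_assoc]

theorem pv_enumerate_take {α : Type} : ∀ (xs : List α) (s : Int) (m : Nat),
    (PySem.List.enumerate xs s).take m = PySem.List.enumerate (xs.take m) s := by
  intro xs
  induction xs with
  | nil => intro s m; simp [PySem.List.enumerate_nil]
  | cons a t ih =>
    intro s m
    cases m with
    | zero => simp
    | succ m => simp [PySem.List.enumerate_cons, ih]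

theorem pv_enumerate_drop {α : Type} : ∀ (xs : List α) (s : Int) (m : Nat),
    (PySem.List.enumerate xs s).drop m = PySem.List.enumerate (xs.drop m) (s + m) := by
  intro xs
  induction xs with
  | nil => intro s m; simp [PySem.List.enumerate_nil]
  | cons a t ih =>
    intro s m
    cases m with
    | zero => simp
    | succ m =>
      simp only [PySem.List.enumerate_cons, List.drop_succ_cons, ih]
      congr 1
      push_cast
      ring

theorem pv_uniq : ∀ (w : List Char), w.count '1' + 1 = w.length →
    ∃ k0, ∃ hk : k0 < w.length, w[k0] ≠ '1' ∧ ∀ m (hm : m < w.length), m ≠ k0 → w[m] = '1' := by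
  intro w
  induction w with
  | nil => intro h; simp at h
  | cons a t ih =>
    intro h
    by_cases ha : a = '1'
    · subst ha
      have ht : t.count '1' + 1 = t.length := by
        simp at h; omega
      obtain ⟨k0, hk, hne, hall⟩ := ih ht
      refine ⟨k0 + 1, by simpa using Nat.succ_lt_succ hk, by simpa using hne, ?_⟩
      intro m hm hmne
      cases m with
      | zero => simp
      | succ m =>
        have : m ≠ k0 := by omega
        simpa using hall m (by simpa using Nat.lt_of_succ_lt_succ hm) this
    · have ht : t.count '1' = t.length := by
        simp [ha] at h; omega
      have hall1 : ∀ b ∈ t, b = '1' := by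
        intro b hb
        have := List.count_eq_length.mp ht
        exact (this b hb).symm
      refine ⟨0, by simp, by simpa using ha, ?_⟩
      intro m hm hmne
      cases m with
      | zero => omega
      | succ m => simpa using hall1 _ (List.getElem_mem _)

theorem pv_sum_zero_of_all_one : ∀ (t : List Char) (s : Int), (∀ c ∈ t, c = '1') →
    ((PySem.List.enumerate t s).map (fun pc => if pc.2 = '1' then (0:Int) else pc.1)).sum = 0 := by
  intro t
  induction t with
  | nil => intro s h; simp [PySem.List.enumerate_nil]
  | cons a t ih =>
    intro s h
    have ha : a = '1' := h a (by simp)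
    simp [PySem.List.enumerate_cons, ha, ih (s+1) (fun c hc => h c (by simp [hc]))]

theorem pv_sum_unique : ∀ (w : List Char) (s : Int) (k0 : Nat) (hk : k0 < w.length),
    w[k0] ≠ '1' → (∀ m (hm : m < w.length), m ≠ k0 → w[m] = '1') →
    ((PySem.List.enumerate w s).map (fun pc => if pc.2 = '1' then (0:Int) else pc.1)).sum = s + k0 := by
  intro w
  induction w with
  | nil => intro s k0 hk; simp at hk
  | cons a t ih =>
    intro s k0 hk hne hall
    cases k0 with
    | zero =>
      have ha : a ≠ '1' := by simpa using hne
      have : ∀ c ∈ t, c = '1' := by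
        intro c hc
        obtain ⟨m, hm, rfl⟩ := List.getElem_of_mem hc
        simpa using hall (m+1) (by simpa using Nat.succ_lt_succ hm) (by omega)
      simp [PySem.List.enumerate_cons, ha, pv_sum_zero_of_all_one t (s+1) this]
    | succ k0 =>
      have ha : a = '1' := hall 0 (by simp) (by omega)
      have h1 : t[k0]'(by simpa using Nat.lt_of_succ_lt_succ hk) ≠ '1' := by simpa using hne
      have h2 : ∀ m (hm : m < t.length), m ≠ k0 → t[m] = '1' := by
        intro m hm hmne
        simpa using hall (m+1) (by simpa using Nat.succ_lt_succ hm) (by omega)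
      have := ih (s+1) k0 (by simpa using Nat.lt_of_succ_lt_succ hk) h1 h2
      simp [PySem.List.enumerate_cons, ha, this]
      ring

theorem pv_index_at (w : List Char) (k0 : Nat) (hk : k0 < w.length) (h0 : w[k0] = '0')
    (hall : ∀ m (hm : m < w.length), m ≠ k0 → w[m] = '1') :
    PySem.List.index? w '0' = some k0 := by
  rw [PySem.List.index?_eq_some_iff]
  refine ⟨w.take k0, w.drop (k0+1), ?_, by simp [List.length_take]; omega, ?_⟩
  · conv_lhs => rw [← List.take_append_drop k0 w]
    rw [List.drop_eq_getElem_cons hk, h0]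
  · intro hmem
    obtain ⟨m, hm, hget⟩ := List.getElem_of_mem hmem
    rw [List.getElem_take] at hget
    have hmlt : m < k0 := by simp [List.length_take] at hm; omega
    have := hall m (by omega) (by omega)
    rw [this] at hget
    exact absurd hget (by decide)


theorem pv_sum_one (l : List Char) :
    ((l.map (fun c => if c = '1' then (1:Int) else 0)).sum) = (l.count '1' : Int) := by
  have h := PySem.List.sum_map_ite_one_zero (fun c : Char => c == '1') l
  simp only [beq_iff_eq] at h
  rw [h, List.count]
theorem find_slash_right_spec : Claim_equal_find_slash_right := by
  intro sr i sn _hdom hpre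
  obtain ⟨hin, hwin⟩ := hpre
  unfold pvRow pvWindow at hwin
  unfold Spec_find_slash_right find_slash_right find_slash_right_alt
  simp only []
  rw [pv_scanSum, pv_scanSum]
  set cs : List Char := ((PySem.List.pyGet? sr i).getD "").toList with hcs
  simp only [pv_sum_one, zero_add, pv_count_single]
  set L := cs.length with hL
  have hpref : ([(0:Int)] ++ (List.range L).map (fun k => ((cs.take (k+1)).count '1' : Int)))
      = (List.range (L+1)).map (fun k => ((cs.take k).count '1' : Int)) := by
    rw [List.range_succ_eq_map]
    simp [List.map_map, Function.comp]
  have hwsE : (PySem.List.enumerate cs 0).length = L := PySem.List.length_enumerate cs 0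
  have hwsum : ([(0:Int)] ++ (List.range (PySem.List.enumerate cs 0).length).map
        (fun k => (((PySem.List.enumerate cs 0).take (k+1)).map (fun pc => if pc.2 = '1' then (0:Int) else pc.1)).sum))
      = (List.range (L+1)).map (fun k => (((PySem.List.enumerate cs 0).take k).map (fun pc => if pc.2 = '1' then (0:Int) else pc.1)).sum) := by
    rw [hwsE, List.range_succ_eq_map]
    simp [List.map_map, Function.comp]
  rw [hpref, hwsum]
  by_cases hlt : ((cs.count '1' : Int) < 4)
  · simp [hlt]
  · simp only [if_neg hlt]
    refine PySem.List.foldl_congr_mem _ _ _ _ ?_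
    intro acc j hj
    rw [PySem.List.mem_pyRange_one] at hj
    obtain ⟨hj0, hjlt⟩ := hj
    lift j to ℕ using hj0 with jn
    have hjn5 : jn + 5 ≤ L := by omega
    -- the slice is the window
    have htn : ((jn:Int) + 5).toNat - ((jn:Int)).toNat = 5 := by omega
    have hslice : PySem.List.slice cs (some (jn:Int)) (some ((jn:Int) + 5)) = (cs.drop jn).take 5 := by
      rw [PySem.List.slice_toNat cs (by omega) (by omega), htn, Int.toNat_natCast]
    rw [hslice]
    set w := (cs.drop jn).take 5 with hw
    have hwlen : w.length = 5 := by
      simp [hw, List.length_take, List.length_drop]; omega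
    -- the pref-table difference is the window count
    have hi5 : ((jn:Int) + 5) = ((jn + 5 : Nat) : Int) := by push_cast; ring
    have hlook : ∀ k : Nat, k ≤ L →
        PySem.List.pyGetD ((List.range (L+1)).map (fun k => ((cs.take k).count '1' : Int))) (k:Int) 0
          = ((cs.take k).count '1' : Int) := by
      intro k hk
      rw [PySem.List.pyGetD_natCast, PySem.List.getD_map_range _ _ _ _ (by omega)]
    have hlook2 : ∀ k : Nat, k ≤ L →
        PySem.List.pyGetD ((List.range (L+1)).map (fun k => (((PySem.List.enumerate cs 0).take k).map (fun pc => if pc.2 = '1' then (0:Int) else pc.1)).sum)) (k:Int) 0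
          = (((PySem.List.enumerate cs 0).take k).map (fun pc => if pc.2 = '1' then (0:Int) else pc.1)).sum := by
      intro k hk
      rw [PySem.List.pyGetD_natCast, PySem.List.getD_map_range _ _ _ _ (by omega)]
    have hsplit : (cs.take (jn+5)).count '1' = (cs.take jn).count '1' + w.count '1' := by
      rw [List.take_add, List.count_append]
    have hdiff : PySem.List.pyGetD ((List.range (L+1)).map (fun k => ((cs.take k).count '1' : Int))) ((jn:Int) + 5) 0
        - PySem.List.pyGetD ((List.range (L+1)).map (fun k => ((cs.take k).count '1' : Int))) ((jn:Int)) 0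
        = (w.count '1' : Int) := by
      rw [hi5, hlook _ (by omega), hlook _ (by omega), hsplit]
      push_cast; ring
    rw [hdiff]
    by_cases h4 : ((w.count '1' : Int) ≠ 4)
    · simp [h4]
    · have h4' : w.count '1' = 4 := by omega
      simp only [if_neg (by omega : ¬ ((w.count '1' : Int) ≠ 4))]
      -- unique non-'1' cell
      obtain ⟨k0, hk, hne1, hall⟩ := pv_uniq w (by omega)
      have hk5 : k0 < 5 := by omega
      have hwin0 : '0' ∈ w := hwin jn (by omega) h4'
      have h0 : w[k0] = '0' := by
        obtain ⟨m, hm, hget⟩ := List.getElem_of_mem hwin0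
        rcases eq_or_ne m k0 with rfl | hne2
        · exact hget
        · rw [hall m hm hne2] at hget
          exact absurd hget (by decide)
      rw [pv_index_at w k0 hk h0 hall]
      -- the wsum-table difference is j + k0
      have hwtake : (PySem.List.enumerate cs 0).take (jn+5)
          = (PySem.List.enumerate cs 0).take jn ++ PySem.List.enumerate w (jn:Int) := by
        rw [List.take_add, pv_enumerate_drop, pv_enumerate_take, pv_enumerate_take, zero_add]
      have hdiff2 : PySem.List.pyGetD ((List.range (L+1)).map (fun k => (((PySem.List.enumerate cs 0).take k).map (fun pc => if pc.2 = '1' then (0:Int) else pc.1)).sum)) ((jn:Int) + 5) 0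
          - PySem.List.pyGetD ((List.range (L+1)).map (fun k => (((PySem.List.enumerate cs 0).take k).map (fun pc => if pc.2 = '1' then (0:Int) else pc.1)).sum)) ((jn:Int)) 0
          = (jn:Int) + (k0:Int) := by
        rw [hi5, hlook2 _ (by omega), hlook2 _ (by omega), hwtake, List.map_append, List.sum_append,
          pv_sum_unique w (jn:Int) k0 hk hne1 hall]
        ring
      rw [hdiff2]
      -- B's emptiness guard passes
      have hxi : ((jn:Int) + (k0:Int)) = ((jn + k0 : Nat) : Int) := by push_cast; ring
      have hcsx : cs[jn + k0]'(by omega) = '0' := by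
        rw [← h0]
        simp [hw, List.getElem_take, List.getElem_drop]
      have hguard : (PySem.List.pyGet? cs ((jn:Int) + (k0:Int))).getD ' ' = '0' := by
        rw [hxi, PySem.List.pyGet?_natCast, List.getElem?_eq_getElem (by omega), Option.getD_some, hcsx]
      have hgne : ¬ ((PySem.List.pyGet? cs ((jn:Int) + (k0:Int))).getD ' ' ≠ '0') := by
        simp [hguard]
      rw [if_neg hgne]
      by_cases hi6 : i ≥ 6
      · rw [if_pos hi6, if_pos hi6]
        congr 1
        generalize PySem.Int.mod i 5 = M
        simp only [List.cons.injEq, and_true, Prod.mk.injEq, Option.getD_some]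
        omega
      · rw [if_neg hi6, if_neg hi6]
        congr 1
        simp only [List.cons.injEq, and_true, Prod.mk.injEq, Option.getD_some]
        omega
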